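-- pv_equiv track=rewrite | github.com/openvinotoolkit/open_model_zoo | tools/accuracy_checker/accuracy_checker/utils.py | remove_difficult
-- ===== SOURCE A (Python) =====
-- def remove_difficult(difficult, indexes):
--     new_difficult = []
--     decrementor = 0
--     id_difficult = 0
--     id_removed = 0
--     while id_difficult < len(difficult) and id_removed < len(indexes):
--         if difficult[id_difficult] < indexes[id_removed]:
--             new_difficult.append(difficult[id_difficult] - decrementor)
--             id_difficult += 1
--         else:
--             decrementor += 1
--             id_removed += 1
--
--     return new_difficult
-- ===== SOURCE B (Python) =====
-- def remove_difficult(difficult, indexes):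
--     out = []
--     rest = difficult
--     for k, removed in enumerate(indexes):
--         keep = next((t for t, x in enumerate(rest) if x >= removed), len(rest))
--         out.extend(x - k for x in rest[:keep])
--         if keep == len(rest):
--             break
--         rest = rest[keep:]
--     return out
-- ===== Notes on version B (the rewrite author's own statement) =====
-- stated objective: alternative
-- what changed: A is an element-wise dual-pointer merge over the two lists; B instead iterates over the removed indexes, for each one locating the first surviving element of the remaining difficult list, shifting the whole preceding block down by the removal count at once and slicing it off (block-wise processing, no pointer into difficult, no decrementor variable).
import Mathlib
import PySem

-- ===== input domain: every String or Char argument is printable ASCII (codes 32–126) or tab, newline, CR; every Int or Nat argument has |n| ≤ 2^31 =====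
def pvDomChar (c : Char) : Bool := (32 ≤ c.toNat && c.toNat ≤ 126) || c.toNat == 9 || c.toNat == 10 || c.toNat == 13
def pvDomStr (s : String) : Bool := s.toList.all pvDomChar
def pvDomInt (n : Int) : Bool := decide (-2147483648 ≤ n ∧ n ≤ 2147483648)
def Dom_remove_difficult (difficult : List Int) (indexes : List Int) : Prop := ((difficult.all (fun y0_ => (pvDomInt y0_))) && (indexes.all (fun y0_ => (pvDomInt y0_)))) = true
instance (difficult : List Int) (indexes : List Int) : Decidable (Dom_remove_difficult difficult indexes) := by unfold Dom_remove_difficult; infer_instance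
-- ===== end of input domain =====

-- B replaces A's element-wise dual-pointer merge by a block-wise pass driven by the
-- removed indexes: for each removed index, the first surviving element is located and
-- the preceding block is shifted and sliced off at once; same return value, proved equal.

-- ===== PORT A =====
-- A's while-loop over the two index counters (decrementor kept as an Int, as in Python).
def pvLoopA (difficult indexes new_difficult : List Int) (decrementor : Int)
    (id_difficult id_removed : Nat) : List Int :=
  if h : id_difficult < difficult.length ∧ id_removed < indexes.length then
    if difficult[id_difficult]'h.1 < indexes[id_removed]'h.2 then
      pvLoopA difficult indexes
        (new_difficult ++ [difficult[id_difficult]'h.1 - decrementor])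
        decrementor (id_difficult + 1) id_removed
    else
      pvLoopA difficult indexes new_difficult (decrementor + 1) id_difficult (id_removed + 1)
  else
    new_difficult
termination_by (difficult.length - id_difficult) + (indexes.length - id_removed)
decreasing_by all_goals omega

def remove_difficult (difficult : List Int) (indexes : List Int) : List Int :=
  pvLoopA difficult indexes [] 0 0 0

-- ===== PORT B =====
-- B's for-loop over enumerate(indexes), carrying the remaining suffix `rest` of difficult.
-- `next((t for t, x in enumerate(rest) if x >= removed), len(rest))` is List.findIdx
-- (which returns the length when no element matches, exactly Python's default here).
def pvLoopB : List Int → Nat → List Int → List Int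
  | [], _, _ => []
  | removed :: rs, k, rest =>
    let keep := rest.findIdx (fun x => removed ≤ x)
    let chunk := (rest.take keep).map (fun x => x - (k : Int))
    if keep = rest.length then chunk
    else chunk ++ pvLoopB rs (k + 1) (rest.drop keep)

def remove_difficult_alt (difficult : List Int) (indexes : List Int) : List Int :=
  pvLoopB indexes 0 difficult

-- ===== PRECONDITION & SPEC =====
def Spec_remove_difficult (difficult : List Int) (indexes : List Int) (out : List Int) : Prop := out = remove_difficult_alt difficult indexes
instance (difficult : List Int) (indexes : List Int) (out : List Int) : Decidable (Spec_remove_difficult difficult indexes out) := by unfold Spec_remove_difficult; infer_instance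

-- ===== CLAIM (what is proved, stated in full; the proofs are below) =====
def Claim_equal_remove_difficult : Prop := ∀ (difficult : List Int) (indexes : List Int), Dom_remove_difficult difficult indexes → Spec_remove_difficult difficult indexes (remove_difficult difficult indexes)

-- ===== LEMMAS AND PROOFS =====

-- B's loop on an empty remaining-difficult list yields nothing.
lemma pvLoopB_nil (rs : List Int) (k : Nat) : pvLoopB rs k [] = [] := by
  cases rs with
  | nil => rfl
  | cons r rs => simp [pvLoopB]

-- Head of rest below the current removed index: it is emitted (shifted by k) and consumed.
lemma pvLoopB_cons_lt (r : Int) (rs : List Int) (k : Nat) (d : Int) (rest : List Int)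
    (hlt : d < r) :
    pvLoopB (r :: rs) k (d :: rest) = (d - (k : Int)) :: pvLoopB (r :: rs) k rest := by
  have hp : (fun x => decide (r ≤ x)) d = false := by simp; omega
  conv_lhs => rw [pvLoopB]
  rw [pvLoopB]
  simp only [List.findIdx_cons, hp, cond_false, List.take_succ_cons, List.map_cons,
    List.drop_succ_cons, List.length_cons]
  by_cases h : rest.findIdx (fun x => decide (r ≤ x)) = rest.length
  · simp [h]
  · simp [h]

-- Head of rest at or above the current removed index: move to the next removed index.
lemma pvLoopB_cons_ge (r : Int) (rs : List Int) (k : Nat) (d : Int) (rest : List Int)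
    (hge : r ≤ d) :
    pvLoopB (r :: rs) k (d :: rest) = pvLoopB rs (k + 1) (d :: rest) := by
  have hp : (fun x => decide (r ≤ x)) d = true := by simpa
  rw [pvLoopB]
  simp [List.findIdx_cons, hp]

-- Core invariant: A's loop from state (i, j) with decrementor = j equals acc ++ B's
-- block-wise loop over the remaining removed indexes and remaining difficult suffix.
lemma loop_eq (difficult indexes : List Int) :
    ∀ (acc : List Int) (dec : Int) (i j : Nat), dec = (j : Int) →
      pvLoopA difficult indexes acc dec i j
        = acc ++ pvLoopB (indexes.drop j) j (difficult.drop i) := by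
  intro acc dec i j hdec
  induction acc, dec, i, j using pvLoopA.induct difficult indexes with
  | case1 acc dec i j h hlt ih =>
    subst hdec
    have hdD : difficult.drop i = difficult[i]'h.1 :: difficult.drop (i + 1) :=
      List.drop_eq_getElem_cons h.1
    have hdI : indexes.drop j = indexes[j]'h.2 :: indexes.drop (j + 1) :=
      List.drop_eq_getElem_cons h.2
    rw [pvLoopA, dif_pos h, if_pos hlt, ih rfl, hdD, hdI,
      pvLoopB_cons_lt _ _ _ _ _ hlt, ← hdI]
    simp
  | case2 acc dec i j h hge ih =>
    subst hdec
    have hle : indexes[j]'h.2 ≤ difficult[i]'h.1 := by omega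
    have hdD : difficult.drop i = difficult[i]'h.1 :: difficult.drop (i + 1) :=
      List.drop_eq_getElem_cons h.1
    have hdI : indexes.drop j = indexes[j]'h.2 :: indexes.drop (j + 1) :=
      List.drop_eq_getElem_cons h.2
    rw [pvLoopA, dif_pos h, if_neg (by omega), ih (by push_cast; ring), hdD, hdI,
      pvLoopB_cons_ge _ _ _ _ _ hle, ← hdD]
  | case3 acc dec i j h =>
    subst hdec
    rw [pvLoopA, dif_neg h]
    rcases Nat.lt_or_ge i difficult.length with hi | hi
    · have hj : indexes.length ≤ j := by omega
      simp [List.drop_eq_nil_of_le hj, pvLoopB]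
    · simp [List.drop_eq_nil_of_le hi, pvLoopB_nil]

-- ===== VERDICT (by name: the statement is the Claim_ definition above) =====
theorem remove_difficult_spec : Claim_equal_remove_difficult := by
  intro difficult indexes _
  unfold Spec_remove_difficult remove_difficult remove_difficult_alt
  simpa using loop_eq difficult indexes [] 0 0 0 rfl
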